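-- pv_equiv track=rewrite | github.com/abiczo/gitty | Gitty/ui/tabs.py | filter_diff
-- ===== SOURCE A (Python) =====
-- def filter_diff(diff_output, show_old, show_new):
--     diff_lines = []
--     in_header = True
--     is_merge = False
--
--     for line in diff_output.split('\n'):
--         if line.startswith("diff "):
--             in_header = True
--             is_merge = line.startswith("diff --cc")
--             diff_lines.append(line)
--         elif line.startswith("@@"):
--             in_header = False
--             diff_lines.append(line)
--         elif in_header:
--             diff_lines.append(line)
--         else:
--             # no old/new version distinction for merge diffs
--             if is_merge or \
--                (not line.startswith("-") and not line.startswith("+")) or \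
--                (line.startswith("-") and show_old) or \
--                (line.startswith("+") and show_new):
--                 diff_lines.append(line)
--
--     return "\n".join(diff_lines)
-- ===== SOURCE B (Python) =====
-- def filter_diff(diff_output, show_old, show_new):
--     # Group lines into blocks: a preamble (before any 'diff ' header) plus one
--     # block per 'diff ' header, then filter each block independently.
--     blocks = []
--     cur = []
--     for line in diff_output.split('\n'):
--         if line.startswith("diff "):
--             blocks.append(cur)
--             cur = [line]
--         else:
--             cur.append(line)
--     blocks.append(cur)
--
--     kept = []
--     for block in blocks:
--         is_merge = bool(block) and block[0].startswith("diff --cc")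
--         i = 0
--         while i < len(block) and not block[i].startswith("@@"):
--             kept.append(block[i])
--             i += 1
--         for line in block[i:]:
--             if (line.startswith("@@")
--                     or is_merge
--                     or not (line.startswith("-") or line.startswith("+"))
--                     or (line.startswith("-") and show_old)
--                     or (line.startswith("+") and show_new)):
--                 kept.append(line)
--     return "\n".join(kept)
-- ===== Notes on version B (the rewrite author's own statement) =====
-- stated objective: alternative
-- what changed: B first groups the diff lines into per-file blocks (a preamble plus one block per 'diff ' header), then emits each block's header up to its first '@@' and filters the body lines, instead of A's single streaming pass carrying in_header/is_merge state across all lines.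
import Mathlib
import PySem

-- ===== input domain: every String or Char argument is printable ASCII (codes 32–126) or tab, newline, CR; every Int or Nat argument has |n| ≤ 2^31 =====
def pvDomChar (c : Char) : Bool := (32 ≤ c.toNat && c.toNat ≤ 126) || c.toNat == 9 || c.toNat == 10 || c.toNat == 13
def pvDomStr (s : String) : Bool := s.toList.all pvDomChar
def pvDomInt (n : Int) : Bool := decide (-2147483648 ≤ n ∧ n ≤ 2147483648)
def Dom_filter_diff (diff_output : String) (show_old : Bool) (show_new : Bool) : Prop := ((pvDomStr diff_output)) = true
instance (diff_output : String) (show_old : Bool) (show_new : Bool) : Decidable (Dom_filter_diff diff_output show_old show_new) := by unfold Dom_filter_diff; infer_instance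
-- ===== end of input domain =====

-- B regroups the diff into per-file blocks before filtering (alternative decomposition; same cost).

-- line.startswith(p) (shared Python primitive used by both ports)
def pvSW (l : String) (p : String) : Bool := PySem.Str.startswith l p

-- ===== PORT A =====
-- A's loop state: (diff_lines accumulator, in_header, is_merge)
def pvStepA (show_old show_new : Bool) (st : List String × Bool × Bool) (line : String) :
    List String × Bool × Bool :=
  if pvSW line "diff " then
    (st.1 ++ [line], true, pvSW line "diff --cc")
  else if pvSW line "@@" then
    (st.1 ++ [line], false, st.2.2)
  else if st.2.1 then
    (st.1 ++ [line], st.2.1, st.2.2)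
  else if st.2.2 || (!pvSW line "-" && !pvSW line "+")
      || (pvSW line "-" && show_old)
      || (pvSW line "+" && show_new) then
    (st.1 ++ [line], st.2.1, st.2.2)
  else
    (st.1, st.2.1, st.2.2)

def filter_diff (diff_output : String) (show_old : Bool) (show_new : Bool) : String :=
  let r := ((PySem.Str.split? diff_output "\n").getD []).foldl
    (pvStepA show_old show_new) ([], true, false)
  PySem.Str.join "\n" r.1

-- ===== PORT B =====
-- B step 1: split the lines into a preamble block plus one block per "diff " header line.
def pvSplitBlocks (lines : List String) : List (List String) :=
  let p := lines.foldl
    (fun (st : List (List String) × List String) line =>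
      if pvSW line "diff " then (st.1 ++ [st.2], [line])
      else (st.1, st.2 ++ [line]))
    ([], [])
  p.1 ++ [p.2]

-- the +/- keep test applied to body lines (B's filter condition)
def pvKeep (show_old show_new is_merge : Bool) (l : String) : Bool :=
  pvSW l "@@" || is_merge
    || !(pvSW l "-" || pvSW l "+")
    || (pvSW l "-" && show_old)
    || (pvSW l "+" && show_new)

-- B step 2: within one block, emit header lines up to the first "@@", then filter the body.
def pvProcBlock (show_old show_new : Bool) (block : List String) : List String :=
  let is_merge := match block with
    | [] => false
    | l :: _ => pvSW l "diff --cc"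
  let hdr := block.takeWhile (fun l => !pvSW l "@@")
  let body := block.drop hdr.length
  hdr ++ body.filter (pvKeep show_old show_new is_merge)

def filter_diff_alt (diff_output : String) (show_old : Bool) (show_new : Bool) : String :=
  PySem.Str.join "\n"
    (((pvSplitBlocks ((PySem.Str.split? diff_output "\n").getD [])).map
        (pvProcBlock show_old show_new)).flatten)

-- ===== PRECONDITION & SPEC =====
def Spec_filter_diff (diff_output : String) (show_old : Bool) (show_new : Bool) (out : String) : Prop := out = filter_diff_alt diff_output show_old show_new
instance (diff_output : String) (show_old : Bool) (show_new : Bool) (out : String) : Decidable (Spec_filter_diff diff_output show_old show_new out) := by unfold Spec_filter_diff; infer_instance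

-- ===== CLAIM (what is proved, stated in full; the proofs are below) =====
def Claim_equal_filter_diff : Prop := ∀ (diff_output : String) (show_old : Bool) (show_new : Bool), Dom_filter_diff diff_output show_old show_new → Spec_filter_diff diff_output show_old show_new (filter_diff diff_output show_old show_new)

-- ===== LEMMAS AND PROOFS =====

-- A's loop, rewritten so the kept lines are produced in front (easier to reason about).
def pvRun (show_old show_new : Bool) (ih im : Bool) : List String → List String × Bool × Bool
  | [] => ([], ih, im)
  | l :: ls =>
    if pvSW l "diff " then
      let r := pvRun show_old show_new true (pvSW l "diff --cc") ls
      (l :: r.1, r.2)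
    else if pvSW l "@@" then
      let r := pvRun show_old show_new false im ls
      (l :: r.1, r.2)
    else if ih then
      let r := pvRun show_old show_new ih im ls
      (l :: r.1, r.2)
    else if im || (!pvSW l "-" && !pvSW l "+")
        || (pvSW l "-" && show_old)
        || (pvSW l "+" && show_new) then
      let r := pvRun show_old show_new ih im ls
      (l :: r.1, r.2)
    else
      pvRun show_old show_new ih im ls

theorem pvRun_foldl (so sn : Bool) (ls : List String) :
    ∀ (acc : List String) (ih im : Bool),
      ls.foldl (pvStepA so sn) (acc, ih, im) =
        (acc ++ (pvRun so sn ih im ls).1, (pvRun so sn ih im ls).2) := by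
  induction ls with
  | nil => intro acc ih im; simp [pvRun]
  | cons l ls IH =>
    intro acc ih im
    simp only [List.foldl_cons, pvStepA, pvRun]
    split_ifs <;> simp [IH]

theorem pvRun_append (so sn : Bool) (xs ys : List String) :
    ∀ (ih im : Bool),
      pvRun so sn ih im (xs ++ ys) =
        ((pvRun so sn ih im xs).1 ++
            (pvRun so sn (pvRun so sn ih im xs).2.1 (pvRun so sn ih im xs).2.2 ys).1,
          (pvRun so sn (pvRun so sn ih im xs).2.1 (pvRun so sn ih im xs).2.2 ys).2) := by
  induction xs with
  | nil => intro ih im; simp [pvRun]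
  | cons l xs IH =>
    intro ih im
    simp only [List.cons_append, pvRun]
    split_ifs <;> simp [IH]

def pvNoDiff (b : List String) : Prop :=
  ∀ l ∈ b, pvSW l "diff " = false

theorem pvKeep_of_not_at (so sn im : Bool) (l : String) (hq : pvSW l "@@" = false) :
    pvKeep so sn im l =
      (im || (!pvSW l "-" && !pvSW l "+") || (pvSW l "-" && so) || (pvSW l "+" && sn)) := by
  simp only [pvKeep, hq, Bool.false_or]
  cases pvSW l "-" <;> cases pvSW l "+" <;> simp

theorem pvRun_noDiff_false (so sn im : Bool) (ls : List String) (h : pvNoDiff ls) :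
    (pvRun so sn false im ls).1 = ls.filter (pvKeep so sn im) ∧
      (pvRun so sn false im ls).2 = (false, im) := by
  induction ls with
  | nil => simp [pvRun]
  | cons l ls IH =>
    have hl : pvSW l "diff " = false := h l (by simp)
    have hls : pvNoDiff ls := fun x hx => h x (by simp [hx])
    obtain ⟨IH1, IH2⟩ := IH hls
    by_cases hq : pvSW l "@@" = true
    · have hk : pvKeep so sn im l = true := by simp [pvKeep, hq]
      simp [pvRun, hl, hq, hk, IH1, IH2]
    · rw [Bool.not_eq_true] at hq
      by_cases hk : (im || (!pvSW l "-" && !pvSW l "+")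
          || (pvSW l "-" && so) || (pvSW l "+" && sn)) = true
      · have hkeep : pvKeep so sn im l = true := by rw [pvKeep_of_not_at so sn im l hq]; exact hk
        simp [pvRun, hl, hq, hk, hkeep, IH1, IH2]
      · rw [Bool.not_eq_true] at hk
        have hkeep : pvKeep so sn im l = false := by rw [pvKeep_of_not_at so sn im l hq]; exact hk
        simp [pvRun, hl, hq, hk, hkeep, IH1, IH2]

theorem pvRun_noDiff_true (so sn im : Bool) (ls : List String) (h : pvNoDiff ls) :
    (pvRun so sn true im ls).1 =
      ls.takeWhile (fun l => !pvSW l "@@") ++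
        (ls.drop (ls.takeWhile (fun l => !pvSW l "@@")).length).filter (pvKeep so sn im) := by
  induction ls with
  | nil => simp [pvRun]
  | cons l ls IH =>
    have hl : pvSW l "diff " = false := h l (by simp)
    have hls : pvNoDiff ls := fun x hx => h x (by simp [hx])
    by_cases hq : pvSW l "@@" = true
    · have hk : pvKeep so sn im l = true := by simp [pvKeep, hq]
      obtain ⟨F1, _⟩ := pvRun_noDiff_false so sn im ls hls
      simp [pvRun, hl, hq, F1, List.filter_cons, hk]
    · rw [Bool.not_eq_true] at hq
      simp [pvRun, hl, hq, IH hls]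

-- a line starting with "diff " does not start with "@@"
theorem pvDiff_not_at (l : String) (h : pvSW l "diff " = true) : pvSW l "@@" = false := by
  unfold pvSW at *
  rw [PySem.Str.startswith_eq, PySem.Chars.startswith_iff] at h
  by_contra hq
  rw [Bool.not_eq_false, PySem.Str.startswith_eq, PySem.Chars.startswith_iff] at hq
  obtain ⟨t1, h1⟩ := h
  obtain ⟨t2, h2⟩ := hq
  have e1 : "diff ".toList = ['d', 'i', 'f', 'f', ' '] := by decide
  have e2 : "@@".toList = ['@', '@'] := by decide
  rw [e1] at h1
  rw [e2, ← h1] at h2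
  simp at h2

-- a line not starting with "diff " does not start with "diff --cc"
theorem pvCc_diff (l : String) (h : pvSW l "diff " = false) : pvSW l "diff --cc" = false := by
  by_contra hq
  rw [Bool.not_eq_false] at hq
  unfold pvSW at h hq
  rw [PySem.Str.startswith_eq, PySem.Chars.startswith_iff] at hq
  have hp : "diff ".toList <+: l.toList := List.IsPrefix.trans (by decide) hq
  have : PySem.Str.startswith l "diff " = true := by
    rw [PySem.Str.startswith_eq, PySem.Chars.startswith_iff]; exact hp
  rw [h] at this
  exact Bool.false_ne_true this

def pvGoodBlock (b : List String) : Prop :=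
  ∃ dl rest, b = dl :: rest ∧ pvSW dl "diff " = true ∧ pvNoDiff rest

-- a block whose lines hold no "diff " header is filtered exactly like A's header/body loop
theorem pvProc_noDiff (so sn : Bool) (b : List String) (h : pvNoDiff b) :
    pvProcBlock so sn b = (pvRun so sn true false b).1 := by
  rw [pvRun_noDiff_true so sn false b h]
  cases b with
  | nil => simp [pvProcBlock]
  | cons l ls =>
    have hm : pvSW l "diff --cc" = false := pvCc_diff l (h l (by simp))
    simp only [pvProcBlock, hm]

-- good blocks are filtered the same by A's loop from ANY entry state
theorem pvRun_goodBlocks (so sn : Bool) (bs : List (List String))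
    (h : ∀ b ∈ bs, pvGoodBlock b) :
    ∀ (ih im : Bool),
      (pvRun so sn ih im bs.flatten).1 = (bs.map (pvProcBlock so sn)).flatten := by
  induction bs with
  | nil => intro ih im; simp [pvRun]
  | cons b bs IH =>
    intro ih im
    obtain ⟨dl, rest, rfl, hdl, hrest⟩ := h b (by simp)
    have hbs : ∀ b' ∈ bs, pvGoodBlock b' := fun b' hb' => h b' (by simp [hb'])
    simp only [List.flatten_cons, List.map_cons]
    rw [show (dl :: rest) ++ bs.flatten = dl :: (rest ++ bs.flatten) from rfl]
    simp only [pvRun, hdl, if_true]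
    rw [pvRun_append]
    have hP : pvProcBlock so sn (dl :: rest) =
        dl :: (pvRun so sn true (pvSW dl "diff --cc") rest).1 := by
      rw [pvRun_noDiff_true so sn (pvSW dl "diff --cc") rest hrest]
      simp [pvProcBlock, pvDiff_not_at dl hdl]
    rw [hP]
    simp only [List.cons_append, List.cons.injEq, true_and]
    congr 1
    exact IH hbs _ _

-- the recursive form of B's block splitter
def pvSplitFrom (cur : List String) : List String → List (List String)
  | [] => [cur]
  | l :: ls =>
    if pvSW l "diff " then cur :: pvSplitFrom [l] ls
    else pvSplitFrom (cur ++ [l]) ls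

theorem pvSplitBlocks_foldl (ls : List String) :
    ∀ (bs : List (List String)) (cur : List String),
      (let p := ls.foldl
        (fun (st : List (List String) × List String) line =>
          if pvSW line "diff " then (st.1 ++ [st.2], [line])
          else (st.1, st.2 ++ [line])) (bs, cur)
       p.1 ++ [p.2]) = bs ++ pvSplitFrom cur ls := by
  induction ls with
  | nil => intro bs cur; simp [pvSplitFrom]
  | cons l ls IH =>
    intro bs cur
    simp only [List.foldl_cons, pvSplitFrom]
    split_ifs <;> simp [IH]

theorem pvSplitFrom_flatten (ls : List String) :
    ∀ cur, (pvSplitFrom cur ls).flatten = cur ++ ls := by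
  induction ls with
  | nil => intro cur; simp [pvSplitFrom]
  | cons l ls IH =>
    intro cur
    simp only [pvSplitFrom]
    split_ifs <;> simp [IH]

theorem pvSplitFrom_shape (ls : List String) :
    ∀ cur, ∃ first bs, pvSplitFrom cur ls = (cur ++ first) :: bs ∧
      pvNoDiff first ∧ ∀ b ∈ bs, pvGoodBlock b := by
  induction ls with
  | nil =>
    intro cur
    exact ⟨[], [], by simp [pvSplitFrom], by intro x hx; simp at hx, by intro b hb; simp at hb⟩
  | cons l ls IH =>
    intro cur
    by_cases hl : pvSW l "diff " = true
    · obtain ⟨first', bs', heq, hnd, hgood⟩ := IH [l]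
      refine ⟨[], ([l] ++ first') :: bs', ?_, ?_, ?_⟩
      · simp [pvSplitFrom, hl, heq]
      · intro x hx; simp at hx
      · intro b hb
        rcases List.mem_cons.mp hb with rfl | hb'
        · exact ⟨l, first', rfl, hl, hnd⟩
        · exact hgood b hb'
    · rw [Bool.not_eq_true] at hl
      obtain ⟨first', bs', heq, hnd, hgood⟩ := IH (cur ++ [l])
      refine ⟨[l] ++ first', bs', ?_, ?_, hgood⟩
      · simp only [pvSplitFrom, hl, Bool.false_eq_true, if_false]
        rw [heq]; simp
      · intro x hx
        rcases List.mem_append.mp hx with hx | hx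
        · simp at hx; subst hx; exact hl
        · exact hnd x hx

-- the list-level equivalence: A's streaming loop = B's block decomposition, on any line list
theorem pvLines_eq (so sn : Bool) (ls : List String) :
    (pvRun so sn true false ls).1 =
      ((pvSplitBlocks ls).map (pvProcBlock so sn)).flatten := by
  obtain ⟨pre, bs, heq, hnd, hgood⟩ := pvSplitFrom_shape ls []
  simp only [List.nil_append] at heq
  have hsplit : pvSplitBlocks ls = pre :: bs := by
    simp only [pvSplitBlocks]
    rw [pvSplitBlocks_foldl ls [] []]
    simpa using heq
  have hflat : pre ++ bs.flatten = ls := by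
    have := pvSplitFrom_flatten ls []
    rw [heq] at this
    simpa using this
  rw [hsplit, ← hflat]
  simp only [List.map_cons, List.flatten_cons]
  rw [pvRun_append]
  dsimp only
  rw [pvRun_goodBlocks so sn bs hgood, pvProc_noDiff so sn pre hnd]

-- ===== VERDICT (by name: the statement is the Claim_ definition above) =====
theorem filter_diff_spec : Claim_equal_filter_diff := by
  intro d so sn _
  unfold Spec_filter_diff filter_diff filter_diff_alt
  rw [pvRun_foldl so sn _ [] true false]
  simp only [List.nil_append]
  rw [pvLines_eq]
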